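-- pv_equiv track=rewrite | github.com/jorgeeldis/cpp | Foobar/lovely_lucky_lambs.py | be_generous
-- ===== SOURCE A (Python) =====
-- def be_generous(lambs):
--     prev = 1
--     summ = 1
--     cnt = 1
--     while lambs >= summ + 2*prev:
--         summ = summ + 2*prev
--         prev = 2*prev
--         cnt = cnt + 1
--
--
--     return cnt
-- ===== SOURCE B (Python) =====
-- def be_generous(lambs):
--     if lambs < 3:
--         return 1
--     return (lambs + 1).bit_length() - 1
-- ===== Notes on version B (the rewrite author's own statement) =====
-- stated objective: simpler
-- what changed: Replaces the doubling loop maintaining prev/summ with the closed form floor(log2(lambs+1)) via bit_length, guarded by lambs < 3 for the loop's initial count of 1.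
import Mathlib
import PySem

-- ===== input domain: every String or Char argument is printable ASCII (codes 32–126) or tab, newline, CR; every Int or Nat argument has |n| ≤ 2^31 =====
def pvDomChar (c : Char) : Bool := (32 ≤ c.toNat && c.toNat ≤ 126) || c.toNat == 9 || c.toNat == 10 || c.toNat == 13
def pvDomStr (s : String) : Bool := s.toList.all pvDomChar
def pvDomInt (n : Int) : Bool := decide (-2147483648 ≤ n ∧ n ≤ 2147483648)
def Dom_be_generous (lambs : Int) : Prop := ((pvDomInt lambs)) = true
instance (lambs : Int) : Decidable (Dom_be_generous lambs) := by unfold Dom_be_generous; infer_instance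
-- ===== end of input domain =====

-- B replaces A's doubling loop with the closed form floor(log2(lambs+1)) via bit_length (objective: simpler).


-- ===== PORT A =====
-- the while loop of A, state (summ, prev, cnt); hp (prev stays positive) only justifies termination
def beGenLoop (lambs summ prev cnt : Int) (hp : 0 < prev) : Int :=
  if h : summ + 2 * prev ≤ lambs then
    beGenLoop lambs (summ + 2 * prev) (2 * prev) (cnt + 1) (by omega)
  else cnt
termination_by (lambs - summ).toNat
decreasing_by omega

def be_generous (lambs : Int) : Int := beGenLoop lambs 1 1 1 (by norm_num)

-- ===== PORT B =====
def be_generous_alt (lambs : Int) : Int :=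
  if lambs < 3 then 1
  else (PySem.Int.bitLength (lambs + 1) : Int) - 1

-- ===== PRECONDITION & SPEC =====
def Spec_be_generous (lambs : Int) (out : Int) : Prop := out = be_generous_alt lambs
instance (lambs : Int) (out : Int) : Decidable (Spec_be_generous lambs out) := by unfold Spec_be_generous; infer_instance

-- ===== CLAIM (what is proved, stated in full; the proofs are below) =====
def Claim_equal_be_generous : Prop := ∀ (lambs : Int), Dom_be_generous lambs → Spec_be_generous lambs (be_generous lambs)

-- ===== LEMMAS AND PROOFS =====

-- proofs are irrelevant: the positivity argument may be swapped when prev is rewritten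
theorem beGenLoop_congr (lambs summ c : Int) {p p' : Int} (h : p = p') (hp : 0 < p) (hp' : 0 < p') :
    beGenLoop lambs summ p c hp = beGenLoop lambs summ p' c hp' := by subst h; rfl

-- characterisation of the loop: entered with summ = 2^(k+1)-1, prev = 2^k, it runs exactly
-- d = bitLength(lambs+1) - (k+2) more iterations
theorem beGenLoop_spec (d : Nat) : ∀ (k : Nat) (c lambs : Int) (hpos : 0 < lambs)
    (hb : PySem.Int.bitLength (lambs + 1) = k + 2 + d)
    (hpk : (0:Int) < 2 ^ k),
    beGenLoop lambs ((2:Int) ^ (k + 1) - 1) ((2:Int) ^ k) c hpk = c + d := by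
  induction d with
  | zero =>
    intro k c lambs _hpos _hb hpk
    have hlt := PySem.Int.lt_two_pow_bitLength (lambs + 1)
    rw [_hb, Nat.add_zero] at hlt
    have hub : lambs + 1 < (2:Int) ^ (k + 2) := by
      have hc : ((lambs + 1).natAbs : Int) < (((2:Nat) ^ (k + 2) : Nat) : Int) := by
        exact_mod_cast hlt
      have he : (((2:Nat) ^ (k + 2) : Nat) : Int) = (2:Int) ^ (k + 2) := by push_cast; ring
      rw [he] at hc
      omega
    rw [beGenLoop]
    have hne : ¬ ((2:Int) ^ (k + 1) - 1 + 2 * 2 ^ k ≤ lambs) := by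
      have h1 : (2:Int) ^ (k + 1) = 2 ^ k * 2 := pow_succ 2 k
      have h2 : (2:Int) ^ (k + 2) = 2 ^ (k + 1) * 2 := pow_succ 2 (k + 1)
      omega
    simp [hne]
  | succ d ih =>
    intro k c lambs hpos hb hpk
    have hle := PySem.Int.two_pow_bitLength_le (lambs + 1) (by omega)
    rw [hb] at hle
    have hexp : k + 2 + (d + 1) - 1 = k + 2 + d := by omega
    rw [hexp] at hle
    have hge : (2:Int) ^ (k + 2) ≤ lambs + 1 := by
      have hc : (((2:Nat) ^ (k + 2 + d) : Nat) : Int) ≤ ((lambs + 1).natAbs : Int) := by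
        exact_mod_cast hle
      have he : (((2:Nat) ^ (k + 2 + d) : Nat) : Int) = (2:Int) ^ (k + 2 + d) := by
        push_cast; ring
      rw [he] at hc
      have hmono : (2:Int) ^ (k + 2) ≤ 2 ^ (k + 2 + d) :=
        pow_le_pow_right₀ (by norm_num) (by omega)
      omega
    have h1 : (2:Int) ^ (k + 1) = 2 ^ k * 2 := pow_succ 2 k
    have h2 : (2:Int) ^ (k + 2) = 2 ^ (k + 1) * 2 := pow_succ 2 (k + 1)
    rw [beGenLoop]
    have hc : (2:Int) ^ (k + 1) - 1 + 2 * 2 ^ k ≤ lambs := by omega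
    simp only [hc, dif_pos]
    have harg1 : (2:Int) ^ (k + 1) - 1 + 2 * 2 ^ k = 2 ^ (k + 1 + 1) - 1 := by
      have h3 : (2:Int) ^ (k + 1 + 1) = 2 ^ (k + 1) * 2 := pow_succ 2 (k + 1)
      omega
    have harg2 : (2:Int) * 2 ^ k = 2 ^ (k + 1) := by omega
    have hrec := ih (k + 1) (c + 1) lambs hpos (by omega) (by positivity)
    rw [harg1]
    refine (beGenLoop_congr lambs _ _ harg2 _ (by positivity)).trans ?_
    rw [hrec]
    push_cast; ring

-- ===== VERDICT (by name: the statement is the Claim_ definition above) =====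
theorem be_generous_spec : Claim_equal_be_generous := by
  intro lambs _
  unfold Spec_be_generous be_generous be_generous_alt
  by_cases hlt : lambs < 3
  · rw [beGenLoop]
    simp [hlt]
  · rw [not_lt] at hlt
    set b := PySem.Int.bitLength (lambs + 1) with hbdef
    have hb3 : 3 ≤ b := by
      by_contra hcon
      have hlt2 := PySem.Int.lt_two_pow_bitLength (lambs + 1)
      rw [← hbdef] at hlt2
      have h4 : (2:Nat) ^ b ≤ 4 := by
        calc (2:Nat) ^ b ≤ 2 ^ 2 := Nat.pow_le_pow_right (by norm_num) (by omega)
          _ = 4 := by norm_num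
      omega
    have hmain := beGenLoop_spec (b - 2) 0 1 lambs (by omega) (by omega) (by norm_num)
    norm_num at hmain
    have h2 : ¬ (lambs < 3) := by omega
    simp only [h2, if_false]
    refine Eq.trans ?_ (show (1:Int) + ((b - 2 : Nat) : Int) = (b:Int) - 1 by omega)
    exact hmain
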